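-- pv_equiv track=rewrite | github.com/jack-norrie/aoc | year_2025/src/day_7/day_7_2.py | solve
-- ===== SOURCE A (Python) =====
-- from collections import deque
--
-- def solve(data: list[str]) -> int:
--     m, n = len(data), len(data[0])
--
--     pos = None
--     for c in range(n):
--         if data[0][c] == "S":
--             pos = (0, c)
--
--     if pos is None:
--         raise RuntimeError("Could not find starting position.")
--
--     res = 0
--     q = deque([pos])
--     counts = {pos: 1}
--     for r in range(m - 1):
--         next_counts = {}
--         for _ in range(len(q)):
--             pos = q.popleft()
--             _, c = pos
--
--             if data[r + 1][c] == "^":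
--                 res += 1
--                 left = (r + 1, c - 1)
--                 if left not in next_counts:
--                     q.append(left)
--                 next_counts[left] = next_counts.get(left, 0) + counts[pos]
--
--                 right = (r + 1, c + 1)
--                 if right not in next_counts:
--                     q.append(right)
--                 next_counts[right] = next_counts.get(right, 0) + counts[pos]
--             else:
--                 center = (r + 1, c)
--                 if center not in next_counts:
--                     q.append(center)
--                 next_counts[center] = next_counts.get(center, 0) + counts[pos]
--
--         counts = next_counts
--
--     return sum(counts.values())
-- ===== SOURCE B (Python) =====
-- def solve(data: list[str]) -> int:
--     m = len(data)
--     sc = data[0].rindex("S")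
--     memo = {}
--
--     def f(r, c):
--         while r < m - 1 and data[r + 1][c] != "^":
--             r += 1
--         if r == m - 1:
--             return 1
--         if (r, c) not in memo:
--             memo[(r, c)] = f(r + 1, c - 1) + f(r + 1, c + 1)
--         return memo[(r, c)]
--
--     return f(0, sc)
-- ===== Notes on version B (the rewrite author's own statement) =====
-- stated objective: alternative
-- what changed: Replaces A's forward level-by-level deque+dict propagation of path counts with a memoized top-down recursion f(r,c) counting paths from a cell to the bottom row, which skips straight runs of rows and memoizes only at branch ('^') cells.
import Mathlib
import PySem

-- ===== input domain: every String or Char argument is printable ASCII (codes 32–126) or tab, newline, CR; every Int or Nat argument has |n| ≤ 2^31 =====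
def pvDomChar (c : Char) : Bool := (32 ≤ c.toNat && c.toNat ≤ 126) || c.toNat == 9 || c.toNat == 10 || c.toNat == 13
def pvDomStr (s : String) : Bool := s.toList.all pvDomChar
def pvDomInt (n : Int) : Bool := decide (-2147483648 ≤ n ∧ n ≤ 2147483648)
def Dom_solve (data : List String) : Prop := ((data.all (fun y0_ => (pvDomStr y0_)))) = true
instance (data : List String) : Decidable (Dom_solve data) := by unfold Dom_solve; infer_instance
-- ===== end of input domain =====

-- B replaces A's forward deque/dict level propagation by a memoized top-down recursion that
-- counts paths from each branch cell and skips straight runs of rows (objective: alternative).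

-- ===== PORT A =====
-- data[i][c] (list index then string index, Python semantics; none = IndexError)
def pvCharAt (data : List String) (i c : Int) : Option Char :=
  match PySem.List.pyGet? data i with
  | none => none
  | some s => PySem.Str.pyGet? s c

-- the inner 'for _ in range(len(q))' loop of A; fuel = len(q) at entry; pops from the front,
-- appends at the back; none = IndexError (data[r+1][c]) / KeyError (unreachable).
-- (A's variable 'res' is dead — never returned — and is omitted.)
def innerA (data : List String) (r : Int) (counts : PySem.Dict (Int × Int) Int) :
    Nat → List (Int × Int) → PySem.Dict (Int × Int) Int →
    Option (List (Int × Int) × PySem.Dict (Int × Int) Int)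
  | 0, q, nc => some (q, nc)
  | Nat.succ k, q, nc =>
    match q with
    | [] => none
    | pos :: qrest =>
      match pvCharAt data (r + 1) pos.2 with
      | none => none
      | some ch =>
        match counts.get? pos with
        | none => none
        | some w =>
          if ch = '^' then
            let left : Int × Int := (r + 1, pos.2 - 1)
            let q1 := if nc.contains left then qrest else qrest ++ [left]
            let nc1 := nc.insert left (nc.getD left 0 + w)
            let right : Int × Int := (r + 1, pos.2 + 1)
            let q2 := if nc1.contains right then q1 else q1 ++ [right]
            let nc2 := nc1.insert right (nc1.getD right 0 + w)
            innerA data r counts k q2 nc2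
          else
            let center : Int × Int := (r + 1, pos.2)
            let q1 := if nc.contains center then qrest else qrest ++ [center]
            innerA data r counts k q1 (nc.insert center (nc.getD center 0 + w))

-- one iteration of A's outer 'for r in range(m - 1)' loop
def outerStepA (data : List String)
    (st : Option (List (Int × Int) × PySem.Dict (Int × Int) Int)) (r : Int) :
    Option (List (Int × Int) × PySem.Dict (Int × Int) Int) :=
  match st with
  | none => none
  | some (q, counts) => innerA data r counts q.length q PySem.Dict.empty

def solve (data : List String) : Int :=
  let m : Int := (data.length : Int)
  match PySem.List.pyGet? data 0 with
  | none => 0            -- IndexError: data[0] on an empty list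
  | some row0 =>
    let n : Int := PySem.Str.len row0
    let pos? := (PySem.List.pyRange 0 n 1).foldl
      (fun acc c => if PySem.Str.pyGet? row0 c = some 'S' then some ((0 : Int), c) else acc) none
    match pos? with
    | none => 0          -- RuntimeError: no starting position
    | some pos =>
      match (PySem.List.pyRange 0 (m - 1) 1).foldl (outerStepA data)
          (some ([pos], PySem.Dict.empty.insert pos 1)) with
      | none => 0        -- IndexError inside the loop
      | some (_, counts) => counts.values.sum

-- ===== PORT B =====
-- f(r, c) of Source B: skip non-branching rows, then 1 at the bottom, or memoized sum of the
-- two sub-counts; returns (value, memo). On Python's IndexError (unreachable under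
-- Pre_solve) it returns junk (1, memo).
def fB (data : List String) (m : Int) (r c : Int) (memo : PySem.Dict (Int × Int) Int) :
    Int × PySem.Dict (Int × Int) Int :=
  if h : r < m - 1 then
    match pvCharAt data (r + 1) c with
    | none => (1, memo)     -- IndexError in Python B (outside Pre_solve)
    | some ch =>
      if ch = '^' then
        match memo.get? (r, c) with
        | some v => (v, memo)
        | none =>
          let a := fB data m (r + 1) (c - 1) memo
          let b := fB data m (r + 1) (c + 1) a.2
          (a.1 + b.1, b.2.insert (r, c) (a.1 + b.1))
      else fB data m (r + 1) c memo
  else (1, memo)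
termination_by (m - 1 - r).toNat
decreasing_by all_goals omega

def solve_alt (data : List String) : Int :=
  let m : Int := (data.length : Int)
  match PySem.List.pyGet? data 0 with
  | none => 0            -- IndexError: data[0] on an empty list
  | some row0 =>
    match PySem.List.index? row0.toList.reverse 'S' with
    | none => 0          -- ValueError: no 'S' in row 0
    | some j =>
      let sc : Int := PySem.Str.len row0 - 1 - (j : Int)
      (fB data m 0 sc PySem.Dict.empty).1

-- ===== PRECONDITION & SPEC =====
-- the set of columns one row further down reached from the columns cs through row 'row'
def stepCols (row : String) (cs : List Int) : List Int :=
  PySem.Set.ofList (cs.flatMap (fun c =>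
    match PySem.Str.pyGet? row c with
    | some '^' => [c - 1, c + 1]
    | _ => [c]))

-- every column reached by the propagation stays inside its row's index range
def safeFrom : List String → List Int → Bool
  | [], _ => true
  | row :: rest, cs =>
    cs.all (fun c => (PySem.Str.pyGet? row c).isSome) && safeFrom rest (stepCols row cs)

-- Pre_solve admits exactly the inputs where A returns: it excludes the empty grid
-- (IndexError on data[0]), grids with no 'S' in row 0 (A raises RuntimeError), and grids
-- where a reached column leaves the index range of the row below it (A raises IndexError).
def Pre_solve (data : List String) : Prop :=
  (match data with
   | [] => false
   | row0 :: rest =>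
     match PySem.List.index? row0.toList.reverse 'S' with
     | none => false
     | some j => safeFrom rest [(row0.toList.length : Int) - 1 - (j : Int)]) = true

instance (data : List String) : Decidable (Pre_solve data) := by
  unfold Pre_solve; infer_instance

def pvWitness_solve : List String := ["S.", ".^", "..."]

def Spec_solve (data : List String) (out : Int) : Prop := out = solve_alt data
instance (data : List String) (out : Int) : Decidable (Spec_solve data out) := by
  unfold Spec_solve; infer_instance

-- ===== CLAIM (what is proved, stated in full; the proofs are below) =====
def Claim_equal_solve : Prop :=
  ∀ (data : List String), Dom_solve data → Pre_solve data → Spec_solve data (solve data)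

-- ===== LEMMAS AND PROOFS =====

-- number of paths from a cell to the bottom, over the list of rows strictly below it
-- (an out-of-range cell, unreachable under Pre_solve, counts as 1 to mirror fB's junk value)
def F : List String → Int → Int
  | [], _ => 1
  | row :: rest, c =>
    match PySem.Str.pyGet? row c with
    | some ch => if ch = '^' then F rest (c - 1) + F rest (c + 1) else F rest c
    | none => 1

-- B-side: the memo only ever holds correct path counts
theorem F_none {row : String} {rest : List String} {c : Int}
    (h : PySem.Str.pyGet? row c = none) : F (row :: rest) c = 1 := by
  have h' : PySem.List.pyGet? row.toList c = none := by simpa using h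
  simp [F, h']

theorem F_branch {row : String} {rest : List String} {c : Int}
    (h : PySem.Str.pyGet? row c = some '^') :
    F (row :: rest) c = F rest (c - 1) + F rest (c + 1) := by
  have h' : PySem.List.pyGet? row.toList c = some '^' := by simpa using h
  simp [F, h']

theorem F_straight {row : String} {rest : List String} {c : Int} {ch : Char}
    (h : PySem.Str.pyGet? row c = some ch) (hne : ch ≠ '^') :
    F (row :: rest) c = F rest c := by
  have h' : PySem.List.pyGet? row.toList c = some ch := by simpa using h
  simp [F, h', hne]

def MemoOK (data : List String) (memo : PySem.Dict (Int × Int) Int) : Prop :=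
  ∀ p v, memo.get? p = some v → v = F (data.drop (p.1 + 1).toNat) p.2

theorem fB_correct (data : List String) :
    ∀ (k : Nat) (r c : Int) (memo : PySem.Dict (Int × Int) Int),
    ((data.length : Int) - 1 - r).toNat = k → 0 ≤ r → MemoOK data memo →
    (fB data (data.length : Int) r c memo).1 = F (data.drop (r + 1).toNat) c ∧
      MemoOK data (fB data (data.length : Int) r c memo).2 := by
  intro k
  induction k with
  | zero =>
    intro r c memo hk hr hm
    have hge : ¬ r < (data.length : Int) - 1 := by omega
    rw [fB, dif_neg hge]
    have hdrop : data.drop (r + 1).toNat = [] := by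
      apply List.drop_eq_nil_of_le; omega
    rw [hdrop]
    exact ⟨rfl, hm⟩
  | succ k ih =>
    intro r c memo hk hr hm
    have hlt : r < (data.length : Int) - 1 := by omega
    have hidx : (r + 1).toNat < data.length := by omega
    have hget : PySem.List.pyGet? data (r + 1) = some (data[(r + 1).toNat]) := by
      rw [PySem.List.pyGet?_of_nonneg data (by omega)]
      exact List.getElem?_eq_getElem hidx
    have h2 : (r + 2).toNat = (r + 1).toNat + 1 := by omega
    have hdrop : data.drop (r + 1).toNat = data[(r + 1).toNat] :: data.drop ((r + 2).toNat) := by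
      rw [List.drop_eq_getElem_cons hidx, h2]
    have hk' : ((data.length : Int) - 1 - (r + 1)).toNat = k := by omega
    rw [fB, dif_pos hlt]
    simp only [pvCharAt, hget]
    cases hch : PySem.Str.pyGet? data[(r + 1).toNat] c with
    | none =>
      simp only [hch]
      rw [hdrop, F_none hch]
      exact ⟨rfl, hm⟩
    | some ch =>
      simp only [hch]
      by_cases hcar : ch = '^'
      · subst hcar
        rw [if_pos rfl]
        cases hmemo : memo.get? (r, c) with
        | some v =>
          simp only [hmemo]
          have hv := hm (r, c) v hmemo
          exact ⟨hv, hm⟩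
        | none =>
          simp only [hmemo]
          obtain ⟨ha1, ha2⟩ := ih (r + 1) (c - 1) memo hk' (by omega) hm
          obtain ⟨hb1, hb2⟩ := ih (r + 1) (c + 1) _ hk' (by omega) ha2
          have h3 : (r + 1 + 1).toNat = (r + 2).toNat := by omega
          rw [h3] at ha1 hb1
          have hval : (fB data (data.length : Int) (r + 1) (c - 1) memo).1 +
              (fB data (data.length : Int) (r + 1) (c + 1)
                (fB data (data.length : Int) (r + 1) (c - 1) memo).2).1
              = F (data.drop (r + 1).toNat) c := by
            rw [hdrop, F_branch hch, ha1, hb1]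
          constructor
          · exact hval
          · intro p v hp
            rw [PySem.Dict.get?_insert] at hp
            split at hp
            · rename_i hpk
              subst hpk
              injection hp with hv
              rw [← hv, hval]
            · exact hb2 p v hp
      · rw [if_neg hcar]
        obtain ⟨h1, h2⟩ := ih (r + 1) c memo hk' (by omega) hm
        have h3 : (r + 1 + 1).toNat = (r + 2).toNat := by omega
        rw [h3] at h1
        rw [hdrop, F_straight hch hcar]
        exact ⟨h1, h2⟩

-- A-side: weighted sum of a counts dict against F
def wsum (rest : List String) (d : PySem.Dict (Int × Int) Int) : Int :=
  (d.items.map (fun p => p.2 * F rest p.1.2)).sum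

theorem wsum_values (rest : List String) (d : PySem.Dict (Int × Int) Int)
    (h : rest = []) : wsum rest d = d.values.sum := by
  subst h
  unfold wsum
  have : ∀ p : (Int × Int) × Int, p.2 * F [] p.1.2 = p.2 := by
    intro p; simp [F]
  rw [List.map_congr_left (fun p _ => this p)]
  rfl

-- sum over an items list after an in-place overwrite of the (unique) key k
theorem sum_map_update (g : Int × Int → Int) (k : Int × Int) (v w0 : Int) :
    ∀ (l : List ((Int × Int) × Int)), (l.map Prod.fst).Nodup → (k, w0) ∈ l →
    ((l.map (fun p => if p.1 == k then (k, v) else p)).map (fun p => p.2 * g p.1)).sum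
      = (l.map (fun p => p.2 * g p.1)).sum - w0 * g k + v * g k := by
  intro l
  induction l with
  | nil => intro _ hm; cases hm
  | cons p l ihl =>
    intro hnd hm
    simp only [List.map_cons, List.nodup_cons] at hnd ⊢
    by_cases hpk : p.1 = k
    · have hpl : p = (k, w0) := by
        rcases List.mem_cons.mp hm with h | h
        · exact h.symm
        · exact absurd (show k ∈ l.map Prod.fst from List.mem_map.mpr ⟨(k, w0), h, rfl⟩)
            (hpk ▸ hnd.1)
      have hid : l.map (fun p => if p.1 == k then (k, v) else p) = l := by
        have := List.map_congr_left (l := l) (f := fun p => if p.1 == k then (k, v) else p)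
          (g := id) (by
            intro q hq
            have hq1 : q.1 ≠ k := by
              intro hqk
              apply hpk ▸ hnd.1
              exact hqk ▸ List.mem_map.mpr ⟨_, hq, rfl⟩
            simp [hq1])
        rw [this, List.map_id]
      rw [if_pos (by simp [hpk])]
      rw [hid]
      have hp2 : p.2 = w0 := by rw [hpl]
      have hp1 : p.1 = k := hpk
      simp only [List.sum_cons, hp1, hp2]
      ring
    · rw [if_neg (by simp [hpk])]
      have hm' : (k, w0) ∈ l := by
        rcases List.mem_cons.mp hm with h | h
        · exact absurd (congrArg Prod.fst h.symm) hpk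
        · exact h
      simp only [List.sum_cons]
      rw [ihl hnd.2 hm']
      ring

theorem wsum_incr (rest : List String) (d : PySem.Dict (Int × Int) Int)
    (hnd : d.keys.Nodup) (k : Int × Int) (w : Int) :
    wsum rest (d.insert k (d.getD k 0 + w)) = wsum rest d + w * F rest k.2 := by
  unfold wsum
  cases hc : d.contains k
  · rw [PySem.Dict.items_insert_of_not_contains d _ hc,
        PySem.Dict.getD_of_not_contains d 0 hc]
    simp only [List.map_append, List.sum_append, List.map_cons, List.map_nil,
      List.sum_cons, List.sum_nil]
    ring
  · have hsome : (d.get? k).isSome := by rw [← PySem.Dict.contains_eq_isSome_get?, hc]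
    obtain ⟨w0, hw0⟩ := Option.isSome_iff_exists.mp hsome
    rw [PySem.Dict.items_insert_of_contains d _ hc,
        PySem.Dict.getD_of_get?_eq_some d 0 hw0]
    have hmem : (k, w0) ∈ d.items := PySem.Dict.mem_items_of_get?_eq_some d hw0
    have hnd' : (d.items.map Prod.fst).Nodup := hnd
    rw [sum_map_update (fun p => F rest p.2) k (w0 + w) w0 d.items hnd' hmem]
    have : d.getD k 0 = w0 := PySem.Dict.getD_of_get?_eq_some d 0 hw0
    ring

theorem wsum_eq_sum_keys (rest : List String) (d : PySem.Dict (Int × Int) Int)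
    (hnd : d.keys.Nodup) :
    wsum rest d = (d.keys.map (fun p => d.getD p 0 * F rest p.2)).sum := by
  unfold wsum
  rw [PySem.Dict.items_eq_map_keys d hnd 0, List.map_map]
  rfl

theorem mem_stepCols_branch (row : String) (cs : List Int) (c : Int) (hc : c ∈ cs)
    (h : PySem.Str.pyGet? row c = some '^') :
    c - 1 ∈ stepCols row cs ∧ c + 1 ∈ stepCols row cs := by
  constructor <;>
  · simp only [stepCols, PySem.Set.mem_ofList, List.mem_flatMap]
    refine ⟨c, hc, ?_⟩
    rw [h]
    simp

theorem mem_stepCols_straight (row : String) (cs : List Int) (c : Int) (ch : Char) (hc : c ∈ cs)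
    (h : PySem.Str.pyGet? row c = some ch) (hne : ch ≠ '^') : c ∈ stepCols row cs := by
  simp only [stepCols, PySem.Set.mem_ofList, List.mem_flatMap]
  refine ⟨c, hc, ?_⟩
  rw [h]
  split
  · rename_i heq
    injection heq with heq
    exact absurd heq hne
  · simp

theorem inner_inv (data : List String) (r : Int) (counts : PySem.Dict (Int × Int) Int)
    (cs : List Int) (row : String) (rest' : List String)
    (hget : PySem.List.pyGet? data (r + 1) = some row)
    (hsafe : ∀ c ∈ cs, (PySem.Str.pyGet? row c).isSome = true) :
    ∀ (rem : List (Int × Int)) (nc : PySem.Dict (Int × Int) Int),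
    (∀ p ∈ rem, p ∈ counts.keys) →
    (∀ p ∈ counts.keys, p.2 ∈ cs) →
    nc.keys.Nodup →
    (∀ p ∈ nc.keys, p.2 ∈ stepCols row cs) →
    ∃ nc' : PySem.Dict (Int × Int) Int,
      innerA data r counts rem.length (rem ++ nc.keys) nc = some (nc'.keys, nc') ∧
      nc'.keys.Nodup ∧
      (∀ p ∈ nc'.keys, p.2 ∈ stepCols row cs) ∧
      wsum rest' nc' =
        wsum rest' nc + (rem.map (fun p => counts.getD p 0 * F (row :: rest') p.2)).sum := by
  intro rem
  induction rem with
  | nil =>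
    intro nc _ _ hnd hcols
    exact ⟨nc, rfl, hnd, hcols, by simp⟩
  | cons pos rem' ih =>
    intro nc hrem hckeys hnd hcols
    have hpos : pos ∈ counts.keys := hrem pos (by simp)
    have hc0 : pos.2 ∈ cs := hckeys pos hpos
    have hws : (counts.get? pos).isSome := by
      rw [← PySem.Dict.contains_eq_isSome_get?, PySem.Dict.contains_iff_mem_keys]
      exact hpos
    obtain ⟨w, hw⟩ := Option.isSome_iff_exists.mp hws
    obtain ⟨ch, hch⟩ := Option.isSome_iff_exists.mp (hsafe pos.2 hc0)
    have hgetD : counts.getD pos 0 = w := PySem.Dict.getD_of_get?_eq_some counts 0 hw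
    have hch' : PySem.List.pyGet? row.toList pos.2 = some ch := by simpa using hch
    simp only [List.length_cons, List.cons_append, innerA, pvCharAt, hget, hw, hch]
    by_cases hcar : ch = '^'
    · subst hcar
      rw [if_pos rfl]
      set left : Int × Int := (r + 1, pos.2 - 1) with hleft
      set nc1 := nc.insert left (nc.getD left 0 + w) with hnc1
      set right : Int × Int := (r + 1, pos.2 + 1) with hright
      set nc2 := nc1.insert right (nc1.getD right 0 + w) with hnc2
      have hk1 : (if nc.contains left then rem' ++ nc.keys else (rem' ++ nc.keys) ++ [left])
          = rem' ++ nc1.keys := by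
        cases hcl : nc.contains left
        · rw [if_neg (by simp [hcl]), hnc1, PySem.Dict.keys_insert_of_not_contains nc _ hcl,
            List.append_assoc]
        · rw [if_pos (by simp [hcl]), hnc1, PySem.Dict.keys_insert_of_contains nc _ hcl]
      have hnd1 : nc1.keys.Nodup := by
        cases hcl : nc.contains left
        · rw [hnc1, PySem.Dict.keys_insert_of_not_contains nc _ hcl]
          have : left ∉ nc.keys := by
            rw [← PySem.Dict.contains_iff_mem_keys, hcl]; simp
          simp only [List.nodup_append, List.nodup_singleton, true_and]
          refine ⟨hnd, fun a ha b hb => ?_⟩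
          simp only [List.mem_singleton] at hb
          subst hb
          exact fun hab => this (hab ▸ ha)
        · rw [hnc1, PySem.Dict.keys_insert_of_contains nc _ hcl]; exact hnd
      have hcols1 : ∀ p ∈ nc1.keys, p.2 ∈ stepCols row cs := by
        intro p hp
        cases hcl : nc.contains left
        · rw [hnc1, PySem.Dict.keys_insert_of_not_contains nc _ hcl] at hp
          rcases List.mem_append.mp hp with h | h
          · exact hcols p h
          · have : p = left := by simpa using h
            subst this
            rw [hleft]
            exact (mem_stepCols_branch row cs pos.2 hc0 hch).1
        · rw [hnc1, PySem.Dict.keys_insert_of_contains nc _ hcl] at hp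
          exact hcols p hp
      have hk2 : (if nc1.contains right then rem' ++ nc1.keys else (rem' ++ nc1.keys) ++ [right])
          = rem' ++ nc2.keys := by
        cases hcl : nc1.contains right
        · rw [if_neg (by simp [hcl]), hnc2, PySem.Dict.keys_insert_of_not_contains nc1 _ hcl,
            List.append_assoc]
        · rw [if_pos (by simp [hcl]), hnc2, PySem.Dict.keys_insert_of_contains nc1 _ hcl]
      have hnd2 : nc2.keys.Nodup := by
        cases hcl : nc1.contains right
        · rw [hnc2, PySem.Dict.keys_insert_of_not_contains nc1 _ hcl]
          have : right ∉ nc1.keys := by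
            rw [← PySem.Dict.contains_iff_mem_keys, hcl]; simp
          simp only [List.nodup_append, List.nodup_singleton, true_and]
          refine ⟨hnd1, fun a ha b hb => ?_⟩
          simp only [List.mem_singleton] at hb
          subst hb
          exact fun hab => this (hab ▸ ha)
        · rw [hnc2, PySem.Dict.keys_insert_of_contains nc1 _ hcl]; exact hnd1
      have hcols2 : ∀ p ∈ nc2.keys, p.2 ∈ stepCols row cs := by
        intro p hp
        cases hcl : nc1.contains right
        · rw [hnc2, PySem.Dict.keys_insert_of_not_contains nc1 _ hcl] at hp
          rcases List.mem_append.mp hp with h | h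
          · exact hcols1 p h
          · have : p = right := by simpa using h
            subst this
            rw [hright]
            exact (mem_stepCols_branch row cs pos.2 hc0 hch).2
        · rw [hnc2, PySem.Dict.keys_insert_of_contains nc1 _ hcl] at hp
          exact hcols1 p hp
      rw [hk1, hk2]
      obtain ⟨nc', heq, hnd', hcols', hsum'⟩ :=
        ih nc2 (fun p hp => hrem p (by simp [hp])) hckeys hnd2 hcols2
      refine ⟨nc', heq, hnd', hcols', ?_⟩
      rw [hsum', hnc2, wsum_incr rest' nc1 hnd1 right w, hnc1,
        wsum_incr rest' nc hnd left w]
      simp only [List.map_cons, List.sum_cons, hgetD, F_branch hch, hleft, hright]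
      ring
    · rw [if_neg hcar]
      set center : Int × Int := (r + 1, pos.2) with hcenter
      set nc1 := nc.insert center (nc.getD center 0 + w) with hnc1
      have hk1 : (if nc.contains center then rem' ++ nc.keys else (rem' ++ nc.keys) ++ [center])
          = rem' ++ nc1.keys := by
        cases hcl : nc.contains center
        · rw [if_neg (by simp [hcl]), hnc1, PySem.Dict.keys_insert_of_not_contains nc _ hcl,
            List.append_assoc]
        · rw [if_pos (by simp [hcl]), hnc1, PySem.Dict.keys_insert_of_contains nc _ hcl]
      have hnd1 : nc1.keys.Nodup := by
        cases hcl : nc.contains center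
        · rw [hnc1, PySem.Dict.keys_insert_of_not_contains nc _ hcl]
          have : center ∉ nc.keys := by
            rw [← PySem.Dict.contains_iff_mem_keys, hcl]; simp
          simp only [List.nodup_append, List.nodup_singleton, true_and]
          refine ⟨hnd, fun a ha b hb => ?_⟩
          simp only [List.mem_singleton] at hb
          subst hb
          exact fun hab => this (hab ▸ ha)
        · rw [hnc1, PySem.Dict.keys_insert_of_contains nc _ hcl]; exact hnd
      have hcols1 : ∀ p ∈ nc1.keys, p.2 ∈ stepCols row cs := by
        intro p hp
        cases hcl : nc.contains center
        · rw [hnc1, PySem.Dict.keys_insert_of_not_contains nc _ hcl] at hp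
          rcases List.mem_append.mp hp with h | h
          · exact hcols p h
          · have : p = center := by simpa using h
            subst this
            rw [hcenter]
            exact mem_stepCols_straight row cs pos.2 ch hc0 hch hcar
        · rw [hnc1, PySem.Dict.keys_insert_of_contains nc _ hcl] at hp
          exact hcols p hp
      rw [hk1]
      obtain ⟨nc', heq, hnd', hcols', hsum'⟩ :=
        ih nc1 (fun p hp => hrem p (by simp [hp])) hckeys hnd1 hcols1
      refine ⟨nc', heq, hnd', hcols', ?_⟩
      rw [hsum', hnc1, wsum_incr rest' nc hnd center w]
      simp only [List.map_cons, List.sum_cons, hgetD, F_straight hch hcar, hcenter]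
      ring

theorem outer_inv (data : List String) :
    ∀ (k : Nat) (r : Int) (counts : PySem.Dict (Int × Int) Int) (cs : List Int),
    0 ≤ r → r + (k : Int) = (data.length : Int) - 1 →
    counts.keys.Nodup →
    (∀ p ∈ counts.keys, p.2 ∈ cs) →
    safeFrom (data.drop (r + 1).toNat) cs = true →
    ∃ q' counts',
      (PySem.List.pyRange r ((data.length : Int) - 1) 1).foldl (outerStepA data)
          (some (counts.keys, counts)) = some (q', counts') ∧
      counts'.values.sum = wsum (data.drop (r + 1).toNat) counts := by
  intro k
  induction k with
  | zero =>
    intro r counts cs hr hk hnd hcols hsafe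
    rw [PySem.List.pyRange_one_eq_nil (by omega : (data.length : Int) - 1 ≤ r)]
    simp only [List.foldl_nil]
    refine ⟨counts.keys, counts, rfl, ?_⟩
    have hdrop : data.drop (r + 1).toNat = [] := List.drop_eq_nil_of_le (by omega)
    rw [hdrop]
    exact (wsum_values [] counts rfl).symm
  | succ k ih =>
    intro r counts cs hr hk hnd hcols hsafe
    have hlt : r < (data.length : Int) - 1 := by omega
    have hidx : (r + 1).toNat < data.length := by omega
    have hget : PySem.List.pyGet? data (r + 1) = some (data[(r + 1).toNat]) := by
      rw [PySem.List.pyGet?_of_nonneg data (by omega)]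
      exact List.getElem?_eq_getElem hidx
    have h2 : (r + 2).toNat = (r + 1).toNat + 1 := by omega
    have hdrop : data.drop (r + 1).toNat = data[(r + 1).toNat] :: data.drop ((r + 2).toNat) := by
      rw [List.drop_eq_getElem_cons hidx, h2]
    rw [hdrop] at hsafe
    simp only [safeFrom, Bool.and_eq_true, List.all_eq_true] at hsafe
    obtain ⟨hsafe1, hsafe2⟩ := hsafe
    obtain ⟨nc', heq, hnd', hcols', hsum'⟩ :=
      inner_inv data r counts cs data[(r + 1).toNat] (data.drop (r + 2).toNat) hget
        (fun c hc => hsafe1 c hc) counts.keys PySem.Dict.empty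
        (fun p hp => hp) hcols (by rw [PySem.Dict.keys_empty]; exact List.nodup_nil)
        (by rw [PySem.Dict.keys_empty]; intro p hp; cases hp)
    rw [PySem.Dict.keys_empty, List.append_nil] at heq
    rw [PySem.List.pyRange_one_cons hlt]
    simp only [List.foldl_cons, outerStepA]
    rw [heq]
    have hW : wsum (data.drop (r + 2).toNat) nc' = wsum (data.drop (r + 1).toNat) counts := by
      rw [hsum', hdrop, wsum_eq_sum_keys _ counts hnd]
      have hz : wsum (data.drop (r + 2).toNat) PySem.Dict.empty = 0 := rfl
      rw [hz, zero_add]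
    have h3 : (r + 1 + 1).toNat = (r + 2).toNat := by omega
    obtain ⟨q'', counts'', hfold, hsum''⟩ :=
      ih (r + 1) nc' (stepCols data[(r + 1).toNat] cs) (by omega) (by omega) hnd' hcols'
        (by rw [h3]; exact hsafe2)
    refine ⟨q'', counts'', hfold, ?_⟩
    rw [hsum'', h3, hW]

theorem lastS_fold_list (cs : List Char) :
    (PySem.List.pyRange 0 (cs.length : Int) 1).foldl
      (fun acc c => if PySem.List.pyGet? cs c = some 'S' then some ((0 : Int), c) else acc) none
    = (PySem.List.index? cs.reverse 'S').map
        (fun j : Nat => ((0 : Int), (cs.length : Int) - 1 - (j : Int))) := by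
  induction cs using List.reverseRecOn with
  | nil => simp [PySem.List.pyRange_one_eq_nil]
  | append_singleton cs x ihx =>
    have hlen : ((cs ++ [x]).length : Int) = (cs.length : Int) + 1 := by
      simp
    rw [hlen, PySem.List.pyRange_one_succ_right (by positivity), List.foldl_append]
    have hcongr : (PySem.List.pyRange 0 (cs.length : Int)).foldl
        (fun acc c => if PySem.List.pyGet? (cs ++ [x]) c = some 'S'
          then some ((0 : Int), c) else acc) none
        = (PySem.List.pyRange 0 (cs.length : Int)).foldl
        (fun acc c => if PySem.List.pyGet? cs c = some 'S'
          then some ((0 : Int), c) else acc) none := by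
      apply PySem.List.foldl_congr_mem
      intro acc c hc
      have hc' := PySem.List.mem_pyRange_one.mp hc
      have hlt : c.toNat < cs.length := by omega
      rw [PySem.List.pyGet?_of_nonneg _ (by omega), PySem.List.pyGet?_of_nonneg _ (by omega),
        List.getElem?_append_left hlt]
    rw [hcongr, ihx]
    have hx : PySem.List.pyGet? (cs ++ [x]) (cs.length : Int) = some x :=
      PySem.List.pyGet?_append_length cs [] x
    simp only [List.foldl_cons, List.foldl_nil]
    by_cases hxs : x = 'S'
    · subst hxs
      rw [if_pos hx]
      rw [List.reverse_append, List.reverse_singleton, List.singleton_append,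
        PySem.List.index?_cons_self]
      simp
    · rw [if_neg (by rw [hx]; exact fun h => hxs (Option.some.inj h))]
      rw [List.reverse_append, List.reverse_singleton, List.singleton_append,
        PySem.List.index?_cons_of_ne _ hxs]
      cases PySem.List.index? cs.reverse 'S' with
      | none => simp
      | some j =>
        simp [Prod.ext_iff]
        omega

theorem lastS_fold_str (s : String) :
    (PySem.List.pyRange 0 (PySem.Str.len s) 1).foldl
      (fun acc c => if PySem.Str.pyGet? s c = some 'S' then some ((0 : Int), c) else acc) none
    = (PySem.List.index? s.toList.reverse 'S').map
        (fun j : Nat => ((0 : Int), (s.toList.length : Int) - 1 - (j : Int))) := by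
  rw [PySem.Str.len_eq]
  rw [PySem.List.foldl_congr_mem _ _
    (fun acc c => if PySem.List.pyGet? s.toList c = some 'S' then some ((0 : Int), c) else acc)
    none (by intro acc c _; simp)]
  exact lastS_fold_list s.toList

-- ===== VERDICT (by name: the statement is the Claim_ definition above) =====
theorem solve_spec : Claim_equal_solve := by
  intro data _ hpre
  unfold Spec_solve
  unfold Pre_solve at hpre
  cases data with
  | nil => simp at hpre
  | cons row0 rest =>
    dsimp only at hpre
    cases hS : PySem.List.index? row0.toList.reverse 'S' with
    | none => rw [hS] at hpre; simp at hpre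
    | some j =>
      rw [hS] at hpre
      -- hpre : safeFrom rest [len - 1 - j] = true
      have hB : solve_alt (row0 :: rest) =
          F rest ((row0.toList.length : Int) - 1 - (j : Int)) := by
        simp only [solve_alt, PySem.List.pyGet?_zero_cons, hS, PySem.Str.len_eq]
        have hmemo : MemoOK (row0 :: rest) PySem.Dict.empty := by
          intro p v h
          rw [PySem.Dict.get?_empty] at h
          cases h
        have := (fB_correct (row0 :: rest)
          (((row0 :: rest).length : Int) - 1 - 0).toNat 0
          ((row0.toList.length : Int) - 1 - (j : Int)) PySem.Dict.empty rfl (le_refl 0) hmemo).1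
        simpa using this
      have hA : solve (row0 :: rest) =
          F rest ((row0.toList.length : Int) - 1 - (j : Int)) := by
        simp only [solve, PySem.List.pyGet?_zero_cons]
        rw [lastS_fold_str row0, hS]
        simp only [Option.map_some]
        set sc : Int := (row0.toList.length : Int) - 1 - (j : Int) with hsc
        set init : PySem.Dict (Int × Int) Int := PySem.Dict.empty.insert (0, sc) 1 with hinit
        have hkeys : init.keys = [((0 : Int), sc)] := by
          rw [hinit, PySem.Dict.keys_insert_of_not_contains _ _ (PySem.Dict.contains_empty _),
            PySem.Dict.keys_empty, List.nil_append]
        obtain ⟨q', counts', hfold, hsum⟩ :=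
          outer_inv (row0 :: rest) rest.length 0 init [sc] (le_refl 0)
            (by push_cast [List.length_cons]; ring)
            (by rw [hkeys]; exact List.nodup_singleton _)
            (by rw [hkeys]; intro p hp; simp at hp; simp [hp])
            (by simpa using hpre)
        rw [← hkeys, hfold]
        have hitems : init.items = [(((0 : Int), sc), (1 : Int))] := by
          rw [hinit, PySem.Dict.items_insert_of_not_contains _ _ (PySem.Dict.contains_empty _)]
          rfl
        have hwi : wsum (List.drop ((0 : Int) + 1).toNat (row0 :: rest)) init = F rest sc := by
          have h01 : ((0 : Int) + 1).toNat = 1 := rfl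
          simp [wsum, hitems, h01]
        dsimp only
        rw [hsum, hwi]
      rw [hA, hB]
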